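-- pv_equiv track=rewrite | github.com/Aununo/Programs | ctf_crypto/cryptohack/Math/Adrien's Signs.py | descrypt_flag
-- ===== SOURCE A (Python) =====
-- p = 1007621497415251
--
-- def descrypt_flag(cipher):
--     flag = []
--     for i in cipher:
--         if pow(i, (p - 1) // 2, p) == 1:
--             flag.append('1')
--         else:
--             flag.append('0')
--     flag = ''.join(flag)
--     reversed(flag)
--     flag = ''.join([chr(int(flag[i:i + 8], 2)) for i in range(0, len(cipher), 8)])
--     return flag
-- ===== SOURCE B (Python) =====
-- p = 1007621497415251
--
-- def descrypt_flag(cipher):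
--     # One pass: accumulate Legendre-symbol bits into a byte accumulator,
--     # flushing a character every 8 bits; flush the trailing partial byte as-is.
--     e = (p - 1) // 2
--     val = 0
--     count = 0
--     chars = []
--     for i in cipher:
--         bit = 1 if pow(i, e, p) == 1 else 0
--         val = val * 2 + bit
--         count += 1
--         if count == 8:
--             chars.append(chr(val))
--             val = 0
--             count = 0
--     if count > 0:
--         chars.append(chr(val))
--     return ''.join(chars)
-- ===== Notes on version B (the rewrite author's own statement) =====
-- stated objective: simpler
-- what changed: B replaces A's two-phase pipeline (build a '0'/'1' bit-string, then re-parse it with slicing and int(...,2) in a second pass) by a single pass that accumulates each Legendre-symbol bit into an integer byte accumulator and emits a character every 8 bits, flushing the trailing partial byte.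
import Mathlib
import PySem

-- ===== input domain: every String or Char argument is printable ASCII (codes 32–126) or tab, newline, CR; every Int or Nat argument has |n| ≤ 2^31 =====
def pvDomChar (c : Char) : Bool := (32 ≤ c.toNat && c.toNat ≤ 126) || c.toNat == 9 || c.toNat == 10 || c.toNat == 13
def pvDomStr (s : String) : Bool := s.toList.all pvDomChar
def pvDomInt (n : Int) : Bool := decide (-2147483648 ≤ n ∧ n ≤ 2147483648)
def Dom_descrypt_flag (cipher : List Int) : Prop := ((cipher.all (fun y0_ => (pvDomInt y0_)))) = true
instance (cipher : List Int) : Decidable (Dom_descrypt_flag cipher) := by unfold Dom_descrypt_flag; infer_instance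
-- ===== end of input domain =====

-- B fuses A's two phases (bit-string build, then chunked reparse) into one pass with a
-- byte accumulator; objective: simpler (no intermediate bit-string, no slicing/reparsing).


-- ===== PORT A =====
-- Python's built-in pow(b, e, m), m > 0: binary (square-and-multiply) modular
-- exponentiation.  (PySem.Int.powMod is definitionally (b ^ e) % m, which is not
-- computable for this program's fixed exponent (p-1)//2 ≈ 5·10^14, so the built-in is
-- ported here by its own fast algorithm; exact for m > 0, the only use in both programs.)
def pvPowModNat (b e m : Nat) : Nat :=
  if e = 0 then 1 % m
  else
    let h := pvPowModNat b (e / 2) m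
    let h2 := h * h % m
    if e % 2 = 1 then h2 * (b % m) % m else h2
termination_by e
decreasing_by omega

def pvPowMod (b e m : Int) : Int :=
  (pvPowModNat (PySem.Int.mod b m).toNat e.toNat m.toNat : Int)

def pvP : Int := 1007621497415251

-- int(s, 2) — exact here: the argument is a nonempty string of '0'/'1' built just above.
def pvBinVal (cs : List Char) : Int :=
  cs.foldl (fun v c => v * 2 + (if c = '1' then 1 else 0)) 0

def descrypt_flag (cipher : List Int) : String :=
  let flag : List Char := cipher.foldl
    (fun acc i => if pvPowMod i (PySem.Int.floordiv (pvP - 1) 2) pvP = 1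
                  then acc ++ ['1'] else acc ++ ['0']) []
  -- `reversed(flag)` builds an unused iterator: no effect
  String.ofList ((PySem.List.pyRange 0 (PySem.List.len cipher) 8).map
    (fun i => Char.ofNat (pvBinVal (PySem.List.slice flag (some i) (some (i + 8)))).toNat))

-- ===== PORT B =====
def pvStep (s : Int × Int × List Char) (i : Int) : Int × Int × List Char :=
  let bit : Int := if pvPowMod i (PySem.Int.floordiv (pvP - 1) 2) pvP = 1 then 1 else 0
  let val := s.1 * 2 + bit
  let count := s.2.1 + 1
  if count = 8 then (0, 0, s.2.2 ++ [Char.ofNat val.toNat]) else (val, count, s.2.2)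

def descrypt_flag_alt (cipher : List Int) : String :=
  match cipher.foldl pvStep (0, 0, []) with
  | (val, count, chars) =>
    String.ofList (if count > 0 then chars ++ [Char.ofNat val.toNat] else chars)

-- ===== PRECONDITION & SPEC =====
def Spec_descrypt_flag (cipher : List Int) (out : String) : Prop := out = descrypt_flag_alt cipher
instance (cipher : List Int) (out : String) : Decidable (Spec_descrypt_flag cipher out) := by unfold Spec_descrypt_flag; infer_instance

-- ===== CLAIM (what is proved, stated in full; the proofs are below) =====
def Claim_equal_descrypt_flag : Prop := ∀ (cipher : List Int), Dom_descrypt_flag cipher → Spec_descrypt_flag cipher (descrypt_flag cipher)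

-- ===== LEMMAS AND PROOFS =====

-- the bit character / bit value of one cipher element
def pvBitC (i : Int) : Char :=
  if pvPowMod i (PySem.Int.floordiv (pvP - 1) 2) pvP = 1 then '1' else '0'

def pvBitV (i : Int) : Int :=
  if pvPowMod i (PySem.Int.floordiv (pvP - 1) 2) pvP = 1 then 1 else 0

-- the common normal form: the decoded characters, 8 bits at a time
def pvF0 (b : List Char) : Char := Char.ofNat (pvBinVal b).toNat

def pvChunksF (F : List Char → Char) (cs : List Char) : List Char :=
  if _h : cs = [] then []
  else F (cs.take 8) :: pvChunksF F (cs.drop 8)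
termination_by cs.length
decreasing_by
  simp only [List.length_drop]
  have := List.length_pos_iff.mpr _h
  omega

lemma pvFlag_eq_map (cipher : List Int) :
    cipher.foldl
      (fun acc i => if pvPowMod i (PySem.Int.floordiv (pvP - 1) 2) pvP = 1
                    then acc ++ ['1'] else acc ++ ['0']) [] = cipher.map pvBitC := by
  have h : (fun (acc : List Char) (i : Int) =>
      if pvPowMod i (PySem.Int.floordiv (pvP - 1) 2) pvP = 1
      then acc ++ ['1'] else acc ++ ['0'])
      = fun (acc : List Char) (i : Int) => acc ++ [pvBitC i] := by
    funext acc i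
    unfold pvBitC
    split <;> rfl
  rw [h, PySem.List.foldl_append_singleton_eq_map]
  simp

lemma pvBinVal_map (l : List Int) (v : Int) :
    (l.map pvBitC).foldl (fun v c => v * 2 + (if c = '1' then 1 else 0)) v
      = l.foldl (fun v i => v * 2 + pvBitV i) v := by
  rw [List.foldl_map]
  have h : (fun (v : Int) (i : Int) => v * 2 + (if pvBitC i = '1' then 1 else 0))
      = fun (v : Int) (i : Int) => v * 2 + pvBitV i := by
    funext v i
    unfold pvBitC pvBitV
    split <;> simp
  rw [h]

-- A side: the range-slice map is pvChunks
lemma pvChunk_map (F : List Char → Char) :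
    ∀ (n : Nat) (cs : List Char), cs.length ≤ n →
      (List.range ((cs.length + 7) / 8)).map (fun k => F ((cs.drop (8 * k)).take 8))
        = pvChunksF F cs := by
  intro n
  induction n with
  | zero =>
    intro cs h
    have : cs = [] := List.eq_nil_of_length_eq_zero (by omega)
    subst this
    simp [pvChunksF]
  | succ n ih =>
    intro cs h
    by_cases hcs : cs = []
    · subst hcs; simp [pvChunksF]
    · have hlen : 0 < cs.length := List.length_pos_iff.mpr hcs
      rw [pvChunksF]
      simp only [hcs, dite_false]
      have h8 : (cs.length + 7) / 8 = ((cs.drop 8).length + 7) / 8 + 1 := by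
        simp only [List.length_drop]; omega
      rw [h8, List.range_succ_eq_map, List.map_cons, List.map_map]
      have ih2 := ih (cs.drop 8) (by simp only [List.length_drop]; omega)
      simp only [List.length_drop] at ih2
      rw [← ih2]
      congr 1
      simp only [List.length_drop]
      apply List.map_congr_left
      intro k _
      simp only [Function.comp_apply, List.drop_drop]
      congr 3
      omega

lemma pvA_eq (cipher : List Int) :
    descrypt_flag cipher = String.ofList (pvChunksF pvF0 (cipher.map pvBitC)) := by
  unfold descrypt_flag
  rw [pvFlag_eq_map]
  simp only [PySem.List.len_eq]
  rw [PySem.List.pyRange_of_pos 0 (cipher.length : Int) (show (0:Int) < 8 by norm_num)]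
  rw [List.map_map]
  have hcnt : (if (0:Int) < (cipher.length : Int)
      then (((cipher.length : Int) - 0 + 8 - 1) / 8).toNat else 0) = (cipher.length + 7) / 8 := by
    split <;> omega
  rw [hcnt]
  rw [← pvChunk_map pvF0 (cipher.map pvBitC).length (cipher.map pvBitC) le_rfl]
  simp only [List.length_map]
  congr 1
  apply List.map_congr_left
  intro k _
  simp only [Function.comp_apply]
  have ha : (0:Int) + 8 * (k : Int) = ((8 * k : Nat) : Int) := by push_cast; ring
  rw [ha, show ((8:Int)) = ((8:Nat):Int) by norm_cast, PySem.List.slice_natCast_add]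
  rfl

-- B side small-count lemmas
lemma pvFold_small : ∀ (l : List Int) (v c : Int) (chs : List Char),
    0 ≤ c → c + l.length < 8 →
    l.foldl pvStep (v, c, chs) = (l.foldl (fun v i => v * 2 + pvBitV i) v, c + l.length, chs) := by
  intro l
  induction l with
  | nil => intro v c chs _ _; simp
  | cons i t ih =>
    intro v c chs h0 hlt
    simp only [List.length_cons] at hlt
    push_cast at hlt
    have hne : ¬ (c + 1 = 8) := by omega
    simp only [List.foldl_cons]
    rw [show pvStep (v, c, chs) i = (v * 2 + pvBitV i, c + 1, chs) by
      unfold pvStep pvBitV; simp [hne]]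
    rw [ih (v * 2 + pvBitV i) (c + 1) chs (by omega) (by omega)]
    simp only [Prod.mk.injEq, List.length_cons]
    refine ⟨trivial, by push_cast; ring, trivial⟩

lemma pvFold_flush : ∀ (l : List Int) (v c : Int) (chs : List Char),
    0 ≤ c → c < 8 → c + l.length = 8 →
    l.foldl pvStep (v, c, chs)
      = (0, 0, chs ++ [Char.ofNat (l.foldl (fun v i => v * 2 + pvBitV i) v).toNat]) := by
  intro l
  induction l with
  | nil =>
    intro v c chs h0 hlt h8
    simp only [List.length_nil, Nat.cast_zero, add_zero] at h8
    omega
  | cons i t ih =>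
    intro v c chs h0 hlt h8
    simp only [List.length_cons] at h8
    push_cast at h8
    simp only [List.foldl_cons]
    by_cases hc : c + 1 = 8
    · have ht : t = [] := by
        have : (t.length : Int) = 0 := by omega
        exact List.eq_nil_of_length_eq_zero (by exact_mod_cast this)
      subst ht
      rw [show pvStep (v, c, chs) i = (0, 0, chs ++ [Char.ofNat (v * 2 + pvBitV i).toNat]) by
        unfold pvStep pvBitV; simp [hc]]
      simp
    · rw [show pvStep (v, c, chs) i = (v * 2 + pvBitV i, c + 1, chs) by
        unfold pvStep pvBitV; simp [hc]]
      rw [ih (v * 2 + pvBitV i) (c + 1) chs (by omega) (by omega) (by omega)]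

lemma pvB_eq : ∀ (n : Nat) (cipher : List Int), cipher.length ≤ n → ∀ (chs : List Char),
    (match cipher.foldl pvStep (0, 0, chs) with
     | (val, count, chars) => if count > 0 then chars ++ [Char.ofNat val.toNat] else chars)
      = chs ++ pvChunksF pvF0 (cipher.map pvBitC) := by
  intro n
  induction n with
  | zero =>
    intro cipher h chs
    have : cipher = [] := List.eq_nil_of_length_eq_zero (by omega)
    subst this
    simp [pvChunksF]
  | succ n ih =>
    intro cipher h chs
    rcases Nat.lt_or_ge cipher.length 8 with hlt | hge
    · by_cases hnil : cipher = []
      · subst hnil; simp [pvChunksF]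
      · have hpos : 0 < cipher.length := List.length_pos_iff.mpr hnil
        rw [pvFold_small cipher 0 0 chs le_rfl (by omega)]
        have hc : ((0:Int) + (cipher.length : Int)) > 0 := by omega
        simp only [hc, if_true]
        rw [pvChunksF]
        have hmapnil : ¬ (cipher.map pvBitC = []) := by simp [hnil]
        simp only [hmapnil, dite_false]
        have hdrop : (cipher.map pvBitC).drop 8 = [] :=
          List.drop_eq_nil_of_le (by simp only [List.length_map]; omega)
        have htake : (cipher.map pvBitC).take 8 = cipher.map pvBitC :=
          List.take_of_length_le (by simp only [List.length_map]; omega)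
        rw [hdrop, htake, pvChunksF]
        unfold pvF0 pvBinVal
        rw [pvBinVal_map]
        simp
    · have hsplit : cipher = cipher.take 8 ++ cipher.drop 8 := (List.take_append_drop 8 cipher).symm
      rw [show cipher.foldl pvStep (0, 0, chs)
            = (cipher.drop 8).foldl pvStep ((cipher.take 8).foldl pvStep (0, 0, chs)) by
          conv_lhs => rw [hsplit]
          rw [List.foldl_append]]
      rw [pvFold_flush (cipher.take 8) 0 0 chs le_rfl (by norm_num)
          (by simp only [List.length_take]; omega)]
      rw [ih (cipher.drop 8) (by simp only [List.length_drop]; omega)]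
      conv_rhs => rw [pvChunksF]
      have hmapnil : ¬ (cipher.map pvBitC = []) := by
        simp only [List.map_eq_nil_iff]
        intro hx; subst hx; simp at hge
      simp only [hmapnil, dite_false]
      rw [← List.map_take, ← List.map_drop]
      unfold pvF0 pvBinVal
      rw [pvBinVal_map]
      simp

-- ===== VERDICT (by name: the statement is the Claim_ definition above) =====
theorem descrypt_flag_spec : Claim_equal_descrypt_flag := by
  intro cipher _
  unfold Spec_descrypt_flag
  rw [pvA_eq]
  unfold descrypt_flag_alt
  have h := pvB_eq cipher.length cipher le_rfl []
  rcases hf : cipher.foldl pvStep (0, 0, ([] : List Char)) with ⟨v, c, chs⟩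
  rw [hf] at h
  simp only at h ⊢
  rw [h]
  simp
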